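-- pv_equiv track=rewrite | github.com/FarisKarim/codeforces_solutions | 800/1520A.py | solve
-- ===== SOURCE A (Python) =====
-- def solve(letters):
--     seen = set()
--     i = 0
--     for i in range(1, len(letters)):
--         if letters[i] in seen:
--             return "NO"
--         if letters[i] != letters[i - 1]:
--             seen.add(letters[i - 1])
--     return "YES"
-- ===== SOURCE B (Python) =====
-- def solve(letters):
--     keys = []
--     for ch in letters:
--         if not keys or keys[-1] != ch:
--             keys.append(ch)
--     return "YES" if len(keys) == len(set(keys)) else "NO"
-- ===== Notes on version B (the rewrite author's own statement) =====
-- stated objective: simpler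
-- what changed: B first materializes the list of block head-characters (run-length collapse) and then checks distinctness with len(keys)==len(set(keys)), replacing A's online boundary-tracking seen-set with a build-then-check two-phase decomposition.
import Mathlib
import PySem

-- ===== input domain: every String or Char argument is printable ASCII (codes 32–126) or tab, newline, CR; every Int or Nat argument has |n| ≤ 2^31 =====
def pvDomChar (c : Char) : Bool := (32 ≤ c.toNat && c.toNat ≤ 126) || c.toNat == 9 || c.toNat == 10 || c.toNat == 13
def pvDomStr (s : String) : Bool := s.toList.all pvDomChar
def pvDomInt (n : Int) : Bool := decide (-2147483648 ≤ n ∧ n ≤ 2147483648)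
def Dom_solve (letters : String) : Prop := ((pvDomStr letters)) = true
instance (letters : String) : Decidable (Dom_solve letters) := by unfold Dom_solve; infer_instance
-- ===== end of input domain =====

-- B replaces A's online boundary-tracking seen-set with a two-phase decomposition:
-- build the list of block head-characters, then check its distinctness (objective: simpler).

-- ===== PORT A =====
-- for i in range(1, len(letters)): indices i and i-1 are always in range, so getD is exact here
def solveAux (letters : List Char) (seen : PySem.Set Char) (i : Nat) : String :=
  if _h : i < letters.length then
    let c := letters.getD i ' '
    let p := letters.getD (i - 1) ' '
    if PySem.Set.contains seen c then "NO"
    else if c ≠ p then solveAux letters (PySem.Set.add seen p) (i + 1)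
    else solveAux letters seen (i + 1)
  else "YES"
termination_by letters.length - i

def solve (letters : String) : String :=
  solveAux letters.toList PySem.Set.empty 1

-- ===== PORT B =====
def solve_alt (letters : String) : String :=
  let keys := letters.toList.foldl
    (fun ks ch => if ks = [] ∨ ks.getLast? ≠ some ch then ks ++ [ch] else ks) []
  if keys.length = (PySem.Set.ofList keys).length then "YES" else "NO"

-- ===== PRECONDITION & SPEC =====
def Spec_solve (letters : String) (out : String) : Prop := out = solve_alt letters
instance (letters : String) (out : String) : Decidable (Spec_solve letters out) := by unfold Spec_solve; infer_instance

-- ===== CLAIM (what is proved, stated in full; the proofs are below) =====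
def Claim_equal_solve : Prop := ∀ (letters : String), Dom_solve letters → Spec_solve letters (solve letters)

-- ===== LEMMAS AND PROOFS =====

-- run-length collapse: Kf p l = head characters of the maximal blocks of (p :: l)
def Kf (p : Char) : List Char → List Char
  | [] => [p]
  | c :: l => if c = p then Kf p l else p :: Kf c l

-- structural rendering of A's loop: p = previous character, l = remaining characters
def Lp (p : Char) (l : List Char) (seen : PySem.Set Char) : String :=
  match l with
  | [] => "YES"
  | c :: l =>
    if PySem.Set.contains seen c then "NO"
    else if c ≠ p then Lp c l (PySem.Set.add seen p)
    else Lp c l seen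

theorem mem_Kf_self (l : List Char) (c : Char) : c ∈ Kf c l := by
  induction l generalizing c with
  | nil => simp [Kf]
  | cons d l ih =>
    by_cases h : d = c
    · simpa [Kf, h] using ih c
    · simp [Kf, h]

theorem solveAux_eq_Lp (letters : List Char) (seen : PySem.Set Char) (i : Nat)
    (h1 : 1 ≤ i) (h2 : i ≤ letters.length) :
    solveAux letters seen i = Lp (letters.getD (i - 1) ' ') (letters.drop i) seen := by
  by_cases h : i < letters.length
  · have hd : letters.drop i = letters.getD i ' ' :: letters.drop (i + 1) := by
      rw [List.getD_eq_getElem _ _ h, List.drop_eq_getElem_cons h]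
    have h1' : 1 ≤ i + 1 := by omega
    have h2' : i + 1 ≤ letters.length := by omega
    have hsucc : (i + 1) - 1 = i := by omega
    rw [solveAux, hd, Lp]
    simp only [dif_pos h]
    rw [solveAux_eq_Lp letters (PySem.Set.add seen (letters.getD (i - 1) ' ')) (i + 1) h1' h2',
      solveAux_eq_Lp letters seen (i + 1) h1' h2', hsucc]
  · have : i = letters.length := by omega
    subst this
    rw [solveAux]
    simp [Lp, List.drop_length]
termination_by letters.length - i

theorem Lp_eq (l : List Char) (p : Char) (seen : PySem.Set Char) (hp : p ∉ seen) :
    Lp p l seen =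
      if (Kf p l).Nodup ∧ ∀ k ∈ Kf p l, k ∉ seen then "YES" else "NO" := by
  induction l generalizing p seen with
  | nil => simp [Lp, Kf, hp]
  | cons c l ih =>
    by_cases hc : c ∈ seen
    · have hcp : ¬ c = p := fun h => hp (h ▸ hc)
      have hmem : c ∈ Kf p (c :: l) := by
        simp [Kf, hcp, mem_Kf_self l c]
      have hno : ¬ ((Kf p (c :: l)).Nodup ∧ ∀ k ∈ Kf p (c :: l), k ∉ seen) := by
        intro ⟨_, hall⟩; exact hall c hmem hc
      rw [Lp, if_pos ((PySem.Set.contains_iff seen c).mpr hc), if_neg hno]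
    · have hcon : ¬ (PySem.Set.contains seen c = true) := fun h =>
        hc ((PySem.Set.contains_iff seen c).mp h)
      by_cases hcp : c = p
      · subst hcp
        rw [Lp, if_neg hcon, if_neg (by simp),
          show Kf c (c :: l) = Kf c l from by simp [Kf]]
        exact ih c seen hc
      · have hadd : c ∉ PySem.Set.add seen p := by
          rw [PySem.Set.mem_add]
          exact fun h => h.elim hc hcp
        rw [Lp, if_neg hcon, if_pos (by exact hcp), ih c _ hadd,
          show Kf p (c :: l) = p :: Kf c l from by simp [Kf, hcp]]
        apply if_congr _ rfl rfl
        simp only [List.nodup_cons, List.forall_mem_cons, PySem.Set.mem_add, not_or]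
        constructor
        · rintro ⟨hnd, hall⟩
          exact ⟨⟨fun hpk => (hall p hpk).2 rfl, hnd⟩, hp,
            fun k hk' => (hall k hk').1⟩
        · rintro ⟨⟨hpk, hnd⟩, -, hall⟩
          exact ⟨hnd, fun k hk' => ⟨hall k hk', fun he => hpk (he ▸ hk')⟩⟩

theorem foldl_step_eq_Kf (l : List Char) (acc : List Char) (p : Char) :
    l.foldl (fun ks ch => if ks = [] ∨ ks.getLast? ≠ some ch then ks ++ [ch] else ks)
      (acc ++ [p]) = acc ++ Kf p l := by
  induction l generalizing acc p with
  | nil => simp [Kf]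
  | cons c l ih =>
    simp only [List.foldl_cons]
    by_cases h : c = p
    · subst h
      rw [if_neg (by simp [List.getLast?_append] :
            ¬(acc ++ [c] = [] ∨ (acc ++ [c]).getLast? ≠ some c)),
        show Kf c (c :: l) = Kf c l from by simp [Kf]]
      exact ih acc c
    · rw [if_pos (Or.inr (by
        simp only [List.getLast?_append, List.getLast?_singleton, Option.some_or,
          ne_eq, Option.some.injEq]
        exact fun hh => h hh.symm)),
        ih (acc ++ [p]) c]
      simp [Kf, h, List.append_assoc]

theorem ofList_sublist (xs : List Char) : (PySem.Set.ofList xs).Sublist xs := by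
  induction xs with
  | nil => simp [PySem.Set.ofList_nil]
  | cons x xs ih =>
    rw [PySem.Set.ofList_cons]
    exact List.Sublist.cons₂ x (List.Sublist.trans List.filter_sublist ih)

theorem length_ofList_eq_iff (ks : List Char) :
    ks.length = (PySem.Set.ofList ks).length ↔ ks.Nodup := by
  constructor
  · intro h
    have := (ofList_sublist ks).eq_of_length h.symm
    rw [← this]
    exact PySem.Set.nodup_ofList ks
  · intro h
    rw [PySem.Set.ofList_eq_self_of_nodup _ h]

-- ===== VERDICT (by name: the statement is the Claim_ definition above) =====
theorem solve_spec : Claim_equal_solve := by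
  intro letters _
  unfold Spec_solve solve solve_alt
  cases hL : letters.toList with
  | nil => rw [solveAux]; simp [PySem.Set.ofList_nil]
  | cons a t =>
    have hA : solveAux (a :: t) PySem.Set.empty 1 = Lp a t PySem.Set.empty := by
      have := solveAux_eq_Lp (a :: t) PySem.Set.empty 1 (by omega) (by simp)
      simpa using this
    have hB : List.foldl
        (fun ks ch => if ks = [] ∨ ks.getLast? ≠ some ch then ks ++ [ch] else ks) [] (a :: t) =
        Kf a t := by
      rw [List.foldl_cons, if_pos (Or.inl rfl)]
      simpa using foldl_step_eq_Kf t [] a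
    rw [hA, Lp_eq t a PySem.Set.empty (by simp [PySem.Set.empty])]
    simp only [hB]
    rw [if_congr (and_iff_left (by simp [PySem.Set.empty])) rfl rfl]
    by_cases hnd : (Kf a t).Nodup
    · rw [if_pos hnd, if_pos ((length_ofList_eq_iff _).mpr hnd)]
    · rw [if_neg hnd, if_neg (fun h => hnd ((length_ofList_eq_iff _).mp h))]
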